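-- pv_equiv track=rewrite | github.com/M-R-Epstein/poetics | poetics/patterning.py | resolve_rhyme
-- ===== SOURCE A (Python) =====
-- def resolve_rhyme(candidates, rhyme_counts, rhyme_counts_mult):
--     appearance_count = []
--     appearance_count_mult = []
--     # Create counts of the appearances of the candidate rhymes in resolved lines, and unresolved lines
--     for candidate in candidates:
--         appearance_count.append(rhyme_counts[candidate])
--         appearance_count_mult.append(rhyme_counts_mult[candidate])
--     # If we have a rhyme match to resolved lines, pick the one that matches the most lines.
--     if max(appearance_count) >= 1:
--         return candidates[appearance_count.index(max(appearance_count))]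
--     # If not, pick a rhyme based on how many unresolved lines it matches with (if any).
--     else:
--         return candidates[appearance_count_mult.index(max(appearance_count_mult))]
-- ===== SOURCE B (Python) =====
-- def resolve_rhyme(candidates, rhyme_counts, rhyme_counts_mult):
--     # Single pass over the candidates maintaining both running argmaxes at
--     # once; no auxiliary count lists, no separate max() / .index() rescans.
--     best = best_mult = candidates[0]
--     for c in candidates[1:]:
--         if rhyme_counts[c] > rhyme_counts[best]:
--             best = c
--         if rhyme_counts_mult[c] > rhyme_counts_mult[best_mult]:
--             best_mult = c
--     return best if rhyme_counts[best] >= 1 else best_mult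
-- ===== Notes on version B (the rewrite author's own statement) =====
-- stated objective: alternative
-- what changed: Replaces A's staged pipeline (build two parallel appearance-count lists, then max() plus an .index() rescan per branch) with one fused pass that carries both running best candidates in two accumulators, using strict > to keep the first maximum; the count lists and rescans disappear.
import Mathlib
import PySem

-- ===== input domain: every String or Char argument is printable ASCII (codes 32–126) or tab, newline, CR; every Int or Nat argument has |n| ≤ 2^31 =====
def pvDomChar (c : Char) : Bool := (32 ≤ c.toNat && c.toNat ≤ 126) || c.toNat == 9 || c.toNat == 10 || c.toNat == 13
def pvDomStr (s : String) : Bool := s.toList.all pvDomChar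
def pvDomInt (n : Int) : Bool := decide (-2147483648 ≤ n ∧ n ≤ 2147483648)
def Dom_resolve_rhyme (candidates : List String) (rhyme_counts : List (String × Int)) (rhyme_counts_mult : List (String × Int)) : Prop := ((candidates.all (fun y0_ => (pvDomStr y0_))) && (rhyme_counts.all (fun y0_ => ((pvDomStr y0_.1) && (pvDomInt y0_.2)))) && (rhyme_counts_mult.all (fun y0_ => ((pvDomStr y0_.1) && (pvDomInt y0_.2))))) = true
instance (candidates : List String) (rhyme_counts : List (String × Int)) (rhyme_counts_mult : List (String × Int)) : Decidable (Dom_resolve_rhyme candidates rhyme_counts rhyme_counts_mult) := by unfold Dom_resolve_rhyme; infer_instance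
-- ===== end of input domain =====

-- B replaces A's staged pipeline (two appearance-count lists, max, .index rescan) by one
-- fused pass carrying both running best candidates in two accumulators (same cost).

-- ===== PORT A =====
-- KeyError (a candidate missing from a dict) and max([]) on empty candidates are excluded
-- by Pre_; the `getD` defaults below are only reachable outside Pre_.
def resolve_rhyme (candidates : List String) (rhyme_counts : List (String × Int)) (rhyme_counts_mult : List (String × Int)) : String :=
  let appearance_count := candidates.foldl (fun acc c => acc ++ [PySem.Dict.getD ⟨rhyme_counts⟩ c (0 : Int)]) []
  let appearance_count_mult := candidates.foldl (fun acc c => acc ++ [PySem.Dict.getD ⟨rhyme_counts_mult⟩ c (0 : Int)]) []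
  let m := (PySem.List.max? appearance_count (fun x => x)).getD 0
  if 1 ≤ m then
    (PySem.List.pyGet? candidates (((PySem.List.index? appearance_count m).getD 0 : Nat) : Int)).getD ""
  else
    let m2 := (PySem.List.max? appearance_count_mult (fun x => x)).getD 0
    (PySem.List.pyGet? candidates (((PySem.List.index? appearance_count_mult m2).getD 0 : Nat) : Int)).getD ""

-- ===== PORT B =====
-- candidates[0]/candidates[1:] become head/tail; the [] branch is unreachable under Pre_
-- (Python raises IndexError there).
def resolve_rhyme_alt (candidates : List String) (rhyme_counts : List (String × Int)) (rhyme_counts_mult : List (String × Int)) : String :=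
  match candidates with
  | [] => ""
  | c0 :: rest =>
    let p := rest.foldl (fun (st : String × String) c =>
      (if PySem.Dict.getD ⟨rhyme_counts⟩ st.1 (0 : Int) < PySem.Dict.getD ⟨rhyme_counts⟩ c (0 : Int) then c else st.1,
       if PySem.Dict.getD ⟨rhyme_counts_mult⟩ st.2 (0 : Int) < PySem.Dict.getD ⟨rhyme_counts_mult⟩ c (0 : Int) then c else st.2)) (c0, c0)
    if 1 ≤ PySem.Dict.getD ⟨rhyme_counts⟩ p.1 (0 : Int) then p.1 else p.2

-- ===== PRECONDITION & SPEC =====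
-- Pre_: exactly where the Python A returns normally — a nonempty candidate list (else
-- max([]) raises ValueError) whose every candidate is a key of both dicts (else KeyError).
def Pre_resolve_rhyme (candidates : List String) (rhyme_counts : List (String × Int)) (rhyme_counts_mult : List (String × Int)) : Prop :=
  candidates ≠ [] ∧ ∀ c ∈ candidates,
    (PySem.Dict.get? (⟨rhyme_counts⟩ : PySem.Dict String Int) c).isSome = true ∧
    (PySem.Dict.get? (⟨rhyme_counts_mult⟩ : PySem.Dict String Int) c).isSome = true
instance (candidates : List String) (rhyme_counts : List (String × Int)) (rhyme_counts_mult : List (String × Int)) : Decidable (Pre_resolve_rhyme candidates rhyme_counts rhyme_counts_mult) := by unfold Pre_resolve_rhyme; infer_instance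

def pvWitness_resolve_rhyme : List String × (List (String × Int)) × (List (String × Int)) :=
  (["ab", "cd"], [("ab", 1), ("cd", 2)], [("ab", 0), ("cd", 3)])

def Spec_resolve_rhyme (candidates : List String) (rhyme_counts : List (String × Int)) (rhyme_counts_mult : List (String × Int)) (out : String) : Prop := out = resolve_rhyme_alt candidates rhyme_counts rhyme_counts_mult
instance (candidates : List String) (rhyme_counts : List (String × Int)) (rhyme_counts_mult : List (String × Int)) (out : String) : Decidable (Spec_resolve_rhyme candidates rhyme_counts rhyme_counts_mult out) := by unfold Spec_resolve_rhyme; infer_instance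

-- ===== CLAIM (what is proved, stated in full; the proofs are below) =====
def Claim_equal_resolve_rhyme : Prop := ∀ (candidates : List String) (rhyme_counts : List (String × Int)) (rhyme_counts_mult : List (String × Int)), Dom_resolve_rhyme candidates rhyme_counts rhyme_counts_mult → Pre_resolve_rhyme candidates rhyme_counts rhyme_counts_mult → Spec_resolve_rhyme candidates rhyme_counts rhyme_counts_mult (resolve_rhyme candidates rhyme_counts rhyme_counts_mult)

-- ===== LEMMAS AND PROOFS =====

-- The running-max loop both ports reduce to: fold over t keeping the strictly greater element.
def pvMaxF (f : String → Int) (c : String) (t : List String) : String :=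
  t.foldl (fun m x => if f m < f x then x else m) c

theorem pvMaxF_cons (f : String → Int) (c x : String) (t : List String) :
    pvMaxF f c (x :: t) = pvMaxF f (if f c < f x then x else c) t := rfl

-- B's paired fold is the product of the two independent running-max folds.
theorem pvPairFold (f g : String → Int) (t : List String) :
    ∀ (a b : String),
      t.foldl (fun (st : String × String) c =>
        (if f st.1 < f c then c else st.1, if g st.2 < g c then c else st.2)) (a, b)
      = (pvMaxF f a t, pvMaxF g b t) := by
  induction t with
  | nil => intro a b; simp [pvMaxF]
  | cons x t ih =>
    intro a b
    simp only [List.foldl_cons, pvMaxF_cons]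
    exact ih _ _

theorem pvMax?_map_cons (f : String → Int) (c : String) (t : List String) :
    PySem.List.max? ((c :: t).map f) (fun x => x) = some (f (pvMaxF f c t)) := by
  induction t generalizing c with
  | nil => simp [PySem.List.max?, pvMaxF, List.foldl]
  | cons x t ih =>
    have hstep : PySem.List.max? ((c :: x :: t).map f) (fun x => x)
        = PySem.List.max? (((if f c < f x then x else c) :: t).map f) (fun x => x) := by
      by_cases h : f c < f x <;> simp [PySem.List.max?, List.foldl, h]
    rw [hstep, ih, pvMaxF_cons]

theorem pvMaxF_le (f : String → Int) (c : String) (t : List String) :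
    f c ≤ f (pvMaxF f c t) := by
  induction t generalizing c with
  | nil => simp [pvMaxF]
  | cons x t ih =>
    rw [pvMaxF_cons]
    by_cases h : f c < f x
    · simp only [h, if_pos]
      exact le_of_lt (lt_of_lt_of_le h (ih x))
    · simpa [h] using ih c

theorem pvMaxF_eq_head (f : String → Int) (c : String) (t : List String)
    (h : f (pvMaxF f c t) ≤ f c) : pvMaxF f c t = c := by
  induction t generalizing c with
  | nil => simp [pvMaxF]
  | cons x t ih =>
    rw [pvMaxF_cons] at h ⊢
    by_cases hx : f c < f x
    · exfalso
      rw [if_pos hx] at h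
      have h2 := pvMaxF_le f x t
      linarith
    · rw [if_neg hx] at h ⊢
      exact ih c h

theorem pvMaxF_head_irrel (f : String → Int) (t : List String) :
    ∀ (c c' : String), f c < f (pvMaxF f c t) → f c' ≤ f c → pvMaxF f c' t = pvMaxF f c t := by
  induction t with
  | nil => intro c c' h _; simp [pvMaxF] at h
  | cons x t ih =>
    intro c c' h h'
    rw [pvMaxF_cons] at h ⊢
    rw [pvMaxF_cons]
    by_cases hx : f c < f x
    · rw [if_pos hx] at h ⊢
      rw [if_pos (lt_of_le_of_lt h' hx)]
    · rw [if_neg hx] at h ⊢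
      by_cases hx' : f c' < f x
      · rw [if_pos hx']
        exact ih c x h (not_lt.mp hx)
      · rw [if_neg hx']
        exact ih c c' h h'

theorem pvMaxF_mem (f : String → Int) (c : String) (t : List String) :
    pvMaxF f c t ∈ c :: t := by
  induction t generalizing c with
  | nil => simp [pvMaxF]
  | cons x t ih =>
    rw [pvMaxF_cons]
    by_cases h : f c < f x
    · rw [if_pos h]
      have := ih x
      simp at this ⊢
      tauto
    · rw [if_neg h]
      have := ih c
      simp at this ⊢
      tauto

theorem pvPick (f : String → Int) (t : List String) (c : String) :
    (PySem.List.pyGet? (c :: t)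
        (((PySem.List.index? ((c :: t).map f) (f (pvMaxF f c t))).getD 0 : Nat) : Int)).getD ""
      = pvMaxF f c t := by
  induction t generalizing c with
  | nil =>
    simp [pvMaxF, PySem.List.index?, List.idxOf?_cons]
  | cons x t ih =>
    by_cases hc : f c = f (pvMaxF f c (x :: t))
    · have hb : pvMaxF f c (x :: t) = c := pvMaxF_eq_head f c (x :: t) (le_of_eq hc.symm)
      rw [hb]
      simp [PySem.List.index?, List.idxOf?_cons]
    · have hlt : f c < f (pvMaxF f c (x :: t)) :=
        lt_of_le_of_ne (pvMaxF_le f c (x :: t)) hc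
      have hb : pvMaxF f c (x :: t) = pvMaxF f x t := by
        rw [pvMaxF_cons]
        by_cases hx : f c < f x
        · rw [if_pos hx]
        · rw [if_neg hx]
          rw [pvMaxF_cons, if_neg hx] at hlt
          exact (pvMaxF_head_irrel f t c x hlt (not_lt.mp hx)).symm
      rw [hb]
      have hne : (f c == f (pvMaxF f x t)) = false := by
        rw [hb] at hc
        simp [hc]
      have hmem : f (pvMaxF f x t) ∈ (x :: t).map f :=
        List.mem_map_of_mem (pvMaxF_mem f x t)
      obtain ⟨k, hk⟩ := Option.isSome_iff_exists.mp
        (by simpa [List.isSome_idxOf?] using hmem :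
          (List.idxOf? (f (pvMaxF f x t)) ((x :: t).map f)).isSome = true)
      have := ih x
      rw [PySem.List.index?] at this ⊢
      rw [show List.map f (c :: x :: t) = f c :: List.map f (x :: t) from rfl,
        List.idxOf?_cons, hne, hk]
      simp only [Bool.false_eq_true, if_false, Option.map_some, Option.getD_some]
      rw [hk] at this
      simp only [Option.getD_some] at this
      rw [PySem.List.pyGet?_natCast] at this ⊢
      simpa using this

-- ===== VERDICT (by name: the statement is the Claim_ definition above) =====
theorem resolve_rhyme_spec : Claim_equal_resolve_rhyme := by
  unfold Claim_equal_resolve_rhyme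
  intro candidates rc rcm _ hpre
  unfold Spec_resolve_rhyme
  obtain ⟨hne, -⟩ := hpre
  cases candidates with
  | nil => exact absurd rfl hne
  | cons c t =>
    unfold resolve_rhyme resolve_rhyme_alt
    simp only [PySem.List.foldl_append_singleton_eq_map, List.nil_append]
    rw [pvMax?_map_cons, pvMax?_map_cons,
      pvPairFold (fun c => PySem.Dict.getD ⟨rc⟩ c (0 : Int)) (fun c => PySem.Dict.getD ⟨rcm⟩ c (0 : Int)) t c c]
    simp only [Option.getD_some]
    by_cases h : (1 : Int) ≤ PySem.Dict.getD ⟨rc⟩ (pvMaxF (fun c => PySem.Dict.getD ⟨rc⟩ c (0 : Int)) c t) (0 : Int)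
    · rw [if_pos h, if_pos h]
      exact (pvPick (fun c => PySem.Dict.getD ⟨rc⟩ c (0 : Int)) t c)
    · rw [if_neg h, if_neg h]
      exact pvPick (fun c => PySem.Dict.getD ⟨rcm⟩ c (0 : Int)) t c
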